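-- pv_equiv track=rewrite | github.com/jdpmk/programming-problems | advent-of-code/2023/day2-1.py | solve
-- ===== SOURCE A (Python) =====
-- def solve(games):
--     limit = {"red": 12, "green": 13, "blue": 14}
--     total = 0
--
--     for i, g in enumerate(games):
--         possible = True
--         for (n, c) in (x for r in g for x in r):
--             if n > limit[c]:
--                 possible = False
--                 break
--
--         if possible:
--             total += i + 1
--
--     return total
-- ===== SOURCE B (Python) =====
-- def solve(games):
--     limit = {"red": 12, "green": 13, "blue": 14}
--     total = 0
--     for i, g in enumerate(games):
--         maxima = {}
--         for r in g:
--             for (n, c) in r: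
--                 maxima[c] = max(maxima.get(c, n), n)
--         if all(m <= limit[c] for (c, m) in maxima.items()):
--             total += i + 1
--     return total
-- ===== Notes on version B (the rewrite author's own statement) =====
-- stated objective: alternative
-- what changed: B first reduces each game to a color->max-count dict in one full pass, then tests feasibility by comparing that maxima table against the limits, instead of A's short-circuiting scan over the raw cubes with an early break.
-- outside the precondition, e.g. on solve([[[(100, 'red'), (1, 'purple')]]]): A returns 0, B returns 0; on solve([[[(1, 'red'), (5, 'purple'), (100, 'red')]]]): A raises KeyError, B returns 0
import Mathlib
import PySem

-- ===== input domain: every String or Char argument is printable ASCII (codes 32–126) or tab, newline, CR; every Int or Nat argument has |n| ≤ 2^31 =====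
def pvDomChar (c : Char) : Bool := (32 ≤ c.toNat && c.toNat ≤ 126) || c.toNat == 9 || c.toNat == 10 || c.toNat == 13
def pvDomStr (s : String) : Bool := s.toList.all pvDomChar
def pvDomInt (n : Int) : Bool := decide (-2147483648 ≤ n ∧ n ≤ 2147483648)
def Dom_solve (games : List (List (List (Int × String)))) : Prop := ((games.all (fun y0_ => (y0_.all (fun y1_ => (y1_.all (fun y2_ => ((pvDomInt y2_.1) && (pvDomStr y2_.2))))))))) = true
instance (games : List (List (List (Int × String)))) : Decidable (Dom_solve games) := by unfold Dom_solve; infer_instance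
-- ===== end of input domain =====

-- B reshapes the computation: one reduction pass to a per-color maxima dict per game, then a comparison pass over that dict (alternative decomposition, same cost).

-- ===== PORT A =====
def pvLimit : PySem.Dict String Int := PySem.Dict.ofList [("red", 12), ("green", 13), ("blue", 14)]

-- A's inner loop with its early break; Python's limit[c] raises KeyError on unknown
-- colors (excluded by Pre_solve), the port reads getD c 0 there.
def possibleA : List (Int × String) → Bool
  | [] => true
  | (n, c) :: rest => if n > pvLimit.getD c 0 then false else possibleA rest

def solve (games : List (List (List (Int × String)))) : Int :=
  (PySem.List.enumerate games).foldl
    (fun total ig => if possibleA (ig.2.flatMap id) then total + (ig.1 + 1) else total) 0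

-- ===== PORT B =====
def maximaOf (g : List (List (Int × String))) : PySem.Dict String Int :=
  g.foldl (fun d r =>
    r.foldl (fun d nc => d.insert nc.2 (max (d.getD nc.2 nc.1) nc.1)) d) PySem.Dict.empty

def feasibleB (maxima : PySem.Dict String Int) : Bool :=
  maxima.items.all (fun cm => cm.2 ≤ pvLimit.getD cm.1 0)

def solve_alt (games : List (List (List (Int × String)))) : Int :=
  (PySem.List.enumerate games).foldl
    (fun total ig => if feasibleB (maximaOf ig.2) then total + (ig.1 + 1) else total) 0

-- ===== PRECONDITION & SPEC =====
-- Pre_ excludes games mentioning a color other than red/green/blue: there the limit[c]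
-- lookup raises KeyError unless a short-circuit (A's break, B's all()) fires first, so A
-- and B each return only on an accidental subset of those inputs (where both happen to
-- return they agree, but whether each raises is an artefact of its scan order).
def Pre_solve (games : List (List (List (Int × String)))) : Prop :=
  (games.all (fun g => g.all (fun r => r.all (fun x =>
    x.2 == "red" || x.2 == "green" || x.2 == "blue")))) = true

instance (games : List (List (List (Int × String)))) : Decidable (Pre_solve games) := by
  unfold Pre_solve; infer_instance

def pvWitness_solve : (List (List (List (Int × String)))) :=
  [[[(1, "red"), (20, "blue")], [(3, "green")]], [], [[(13, "red")]]]

def Spec_solve (games : List (List (List (Int × String)))) (out : Int) : Prop := out = solve_alt games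
instance (games : List (List (List (Int × String)))) (out : Int) : Decidable (Spec_solve games out) := by unfold Spec_solve; infer_instance

-- ===== CLAIM (what is proved, stated in full; the proofs are below) =====
def Claim_equal_solve : Prop := ∀ (games : List (List (List (Int × String)))), Dom_solve games → Pre_solve games → Spec_solve games (solve games)

-- ===== LEMMAS AND PROOFS =====

theorem possibleA_iff (cubes : List (Int × String)) :
    possibleA cubes = true ↔ ∀ p ∈ cubes, p.1 ≤ pvLimit.getD p.2 0 := by
  induction cubes with
  | nil => simp [possibleA]
  | cons p rest ih =>
    obtain ⟨n, c⟩ := p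
    simp only [possibleA, List.mem_cons]
    split_ifs with h
    · constructor
      · intro hf; exact absurd hf (by simp)
      · intro hall
        have := hall (n, c) (Or.inl rfl)
        simp at this
        omega
    · rw [ih]
      constructor
      · intro hall q hq
        rcases hq with hq | hq
        · subst hq; simpa using by omega
        · exact hall q hq
      · intro hall q hq; exact hall q (Or.inr hq)

theorem map_replace_all (c : String) (m n : Int) (l : List (String × Int))
    (hnd : (l.map Prod.fst).Nodup) (hm : (c, m) ∈ l) :
    ((l.map (fun p => if p.1 == c then (c, max m n) else p)).all
        (fun cm => cm.2 ≤ pvLimit.getD cm.1 0) = true) ↔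
    (l.all (fun cm => cm.2 ≤ pvLimit.getD cm.1 0) = true ∧ n ≤ pvLimit.getD c 0) := by
  induction l with
  | nil => simp at hm
  | cons p rest ih =>
    obtain ⟨k, v⟩ := p
    simp only [List.map_cons, List.nodup_cons, List.mem_map] at hnd
    rcases List.mem_cons.mp hm with hp | hp
    · -- head is the entry for c
      have hk : k = c := (congrArg Prod.fst hp).symm
      have hv : v = m := (congrArg Prod.snd hp).symm
      subst hv; subst hk
      have hrest : (rest.map (fun p => if p.1 == k then (k, max v n) else p)) = rest := by
        refine (List.map_congr_left ?_).trans (List.map_id rest)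
        intro q hq
        have : q.1 ≠ k := by
          intro hqe
          exact hnd.1 ⟨q, hq, hqe⟩
        simp [this]
      simp only [List.map_cons, beq_self_eq_true, if_true, List.all_cons, hrest]
      simp only [Bool.and_eq_true, decide_eq_true_eq]
      constructor
      · rintro ⟨h1, h2⟩
        have := max_le_iff.mp h1
        exact ⟨⟨this.1, h2⟩, this.2⟩
      · rintro ⟨⟨h1, h2⟩, h3⟩
        exact ⟨max_le_iff.mpr ⟨h1, h3⟩, h2⟩
    · -- entry for c is in the tail; head's key may or may not equal c, but if it does nodup is violated
      have hk : k ≠ c := by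
        intro hke
        exact hnd.1 ⟨(c, m), hp, by simp [hke]⟩
      have ihr := ih hnd.2 hp
      simp only [List.map_cons, List.all_cons]
      have : ((k, v).1 == c) = false := by simpa using hk
      simp only [this, Bool.false_eq_true, if_false, Bool.and_eq_true, ihr]
      tauto

theorem insert_all_iff (d : PySem.Dict String Int) (hd : d.keys.Nodup) (n : Int) (c : String) :
    ((d.insert c (max (d.getD c n) n)).items.all (fun cm => cm.2 ≤ pvLimit.getD cm.1 0) = true) ↔
    (d.items.all (fun cm => cm.2 ≤ pvLimit.getD cm.1 0) = true ∧ n ≤ pvLimit.getD c 0) := by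
  by_cases h : d.contains c = true
  · have hget : (d.get? c).isSome := by rw [← PySem.Dict.contains_eq_isSome_get?]; exact h
    obtain ⟨m, hm⟩ := Option.isSome_iff_exists.mp hget
    have hgd : d.getD c n = m := PySem.Dict.getD_of_get?_eq_some d n hm
    have hmem : (c, m) ∈ d.items := PySem.Dict.mem_items_of_get?_eq_some d hm
    rw [hgd, PySem.Dict.items_insert_of_contains _ _ h]
    exact map_replace_all c m n d.items hd hmem
  · have h' : d.contains c = false := by simpa using h
    have hgd : d.getD c n = n := PySem.Dict.getD_of_not_contains d n h'
    rw [hgd, max_self, PySem.Dict.items_insert_of_not_contains _ _ h']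
    simp

theorem fold_all_iff (cubes : List (Int × String)) (d : PySem.Dict String Int)
    (hd : d.keys.Nodup) :
    ((cubes.foldl (fun d nc => d.insert nc.2 (max (d.getD nc.2 nc.1) nc.1)) d).items.all
        (fun cm => cm.2 ≤ pvLimit.getD cm.1 0) = true) ↔
    (d.items.all (fun cm => cm.2 ≤ pvLimit.getD cm.1 0) = true ∧
      ∀ p ∈ cubes, p.1 ≤ pvLimit.getD p.2 0) := by
  induction cubes generalizing d with
  | nil => simp
  | cons p rest ih =>
    obtain ⟨n, c⟩ := p
    simp only [List.foldl_cons]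
    rw [ih _ (PySem.Dict.nodup_keys_insert _ _ _ hd), insert_all_iff d hd n c]
    simp only [List.mem_cons]
    constructor
    · rintro ⟨⟨h1, h2⟩, h3⟩
      refine ⟨h1, ?_⟩
      rintro q (hq | hq)
      · subst hq; exact h2
      · exact h3 q hq
    · rintro ⟨h1, h2⟩
      exact ⟨⟨h1, h2 (n, c) (Or.inl rfl)⟩, fun q hq => h2 q (Or.inr hq)⟩

theorem maximaOf_flat (g : List (List (Int × String))) :
    maximaOf g = (g.flatMap id).foldl
      (fun d nc => d.insert nc.2 (max (d.getD nc.2 nc.1) nc.1)) PySem.Dict.empty := by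
  unfold maximaOf
  rw [List.flatMap_def, List.foldl_flatten, List.foldl_map]
  simp

theorem game_eq (g : List (List (Int × String))) :
    possibleA (g.flatMap id) = feasibleB (maximaOf g) := by
  rw [Bool.eq_iff_iff, possibleA_iff, maximaOf_flat]
  unfold feasibleB
  rw [fold_all_iff _ _ (by simp)]
  have hempty : (PySem.Dict.empty : PySem.Dict String Int).items = [] := rfl
  simp [hempty]

theorem solve_eq (games : List (List (List (Int × String)))) : solve games = solve_alt games := by
  unfold solve solve_alt
  have hfun : (fun (total : Int) (ig : Int × List (List (Int × String))) =>
      if possibleA (ig.2.flatMap id) then total + (ig.1 + 1) else total) =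
      (fun total ig => if feasibleB (maximaOf ig.2) then total + (ig.1 + 1) else total) := by
    funext t ig
    rw [game_eq]
  rw [hfun]

-- ===== VERDICT (by name: the statement is the Claim_ definition above) =====
theorem solve_spec : Claim_equal_solve := by
  intro games _ _
  unfold Spec_solve
  exact solve_eq games
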